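-- pv_equiv track=rewrite | github.com/UofT-EcoSystem/hotline | hotline/accuracy.py | count_num_per_unique_name
-- ===== SOURCE A (Python) =====
-- IGNORE_LIST = [
--   # Ignored because they are PyTorch internals
--   'aten::zero_',
--   'aten::zeros',
--   'aten::empty',
--   # Ideally we would not ignore these, but they are Python built-ins that are hard to detect
--   'aten::view',
--   'aten::transpose',
--   'aten::as_strided',
-- ]
--
-- def is_interesting_slice(slice):
--   return slice['name'] not in IGNORE_LIST
--
-- def remove_ignore_insignficant_slices(slices):
--   return [slice for slice in slices if is_interesting_slice(slice)]
--
-- def count_num_per_unique_name(slices):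
--   slices = remove_ignore_insignficant_slices(slices)
--   counts = {}
--   for slice in slices:
--     name = slice['name']
--     if name not in counts:
--       counts[name] = 1
--     else:
--       counts[name] += 1
--   return counts
-- ===== SOURCE B (Python) =====
-- IGNORE_LIST = [
--   'aten::zero_',
--   'aten::zeros',
--   'aten::empty',
--   'aten::view',
--   'aten::transpose',
--   'aten::as_strided',
-- ]
--
-- def count_num_per_unique_name(slices):
--   counts = {}
--   for slice in slices:
--     name = slice['name']
--     counts[name] = counts.get(name, 0) + 1
--   for name in IGNORE_LIST:
--     counts.pop(name, None)
--   return counts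
-- ===== Notes on version B (the rewrite author's own statement) =====
-- stated objective: simpler
-- what changed: A filters the slices through a list-comprehension helper pair and then counts with an if/else membership branch; B makes one unconditional counting pass over all slices (counts[name] = counts.get(name, 0) + 1) and afterwards removes the six ignored names from the dict with pop(name, None), flipping filter-then-count into count-then-filter.
import Mathlib
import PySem

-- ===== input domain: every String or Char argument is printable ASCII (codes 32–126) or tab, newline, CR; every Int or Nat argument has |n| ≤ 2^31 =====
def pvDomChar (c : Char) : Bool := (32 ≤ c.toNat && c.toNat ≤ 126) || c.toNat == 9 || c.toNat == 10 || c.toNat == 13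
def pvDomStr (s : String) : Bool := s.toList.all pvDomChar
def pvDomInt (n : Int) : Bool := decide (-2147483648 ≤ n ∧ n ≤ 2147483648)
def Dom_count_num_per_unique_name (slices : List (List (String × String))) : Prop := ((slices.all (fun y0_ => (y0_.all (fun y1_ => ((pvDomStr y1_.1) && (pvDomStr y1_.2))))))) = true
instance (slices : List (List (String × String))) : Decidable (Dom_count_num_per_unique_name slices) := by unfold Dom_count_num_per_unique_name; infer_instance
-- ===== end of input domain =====

-- B replaces A's filter-then-count (helper-pair filter + if/else membership branch) by one
-- unconditional counting pass followed by popping the six ignored names from the dict (simpler).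

-- ===== PORT A =====
-- IGNORE_LIST (module constant, shared by both programs)
def pvIgnoreList : List String :=
  ["aten::zero_", "aten::zeros", "aten::empty", "aten::view", "aten::transpose", "aten::as_strided"]

-- slice['name']; Pre_ guarantees the key is present, so the .getD "" default is never used
def pvSliceName (s : List (String × String)) : String :=
  ((PySem.Dict.mk s).get? "name").getD ""

def is_interesting_slice (s : List (String × String)) : Bool :=
  !(pvIgnoreList.contains (pvSliceName s))

def remove_ignore_insignficant_slices (slices : List (List (String × String))) :
    List (List (String × String)) :=
  slices.filter is_interesting_slice

def count_num_per_unique_name (slices : List (List (String × String))) : List (String × Int) :=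
  let slices := remove_ignore_insignficant_slices slices
  (slices.foldl (fun counts s =>
      let name := pvSliceName s
      if counts.contains name = false then counts.insert name 1
      else counts.modify name 0 (· + 1)) PySem.Dict.empty).items

-- ===== PORT B =====
def count_num_per_unique_name_alt (slices : List (List (String × String))) : List (String × Int) :=
  let counts := slices.foldl (fun c s =>
      let n := pvSliceName s
      c.insert n (c.getD n 0 + 1)) PySem.Dict.empty
  -- counts.pop(name, None): value discarded, missing key tolerated — exactly Dict.erase
  (pvIgnoreList.foldl (fun c n => c.erase n) counts).items

-- ===== PRECONDITION & SPEC =====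
-- Pre_ excludes exactly the inputs where a slice dict has no 'name' key: there slice['name']
-- raises KeyError in both Pythons.
def Pre_count_num_per_unique_name (slices : List (List (String × String))) : Prop :=
  ∀ s ∈ slices, (PySem.Dict.mk s).contains "name" = true
instance (slices : List (List (String × String))) : Decidable (Pre_count_num_per_unique_name slices) := by unfold Pre_count_num_per_unique_name; infer_instance

def pvWitness_count_num_per_unique_name : (List (List (String × String))) :=
  [[("name", "aten::add")], [("name", "aten::zeros")], [("name", "aten::add"), ("dur", "3")]]

def Spec_count_num_per_unique_name (slices : List (List (String × String))) (out : List (String × Int)) : Prop := out = count_num_per_unique_name_alt slices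
instance (slices : List (List (String × String))) (out : List (String × Int)) : Decidable (Spec_count_num_per_unique_name slices out) := by unfold Spec_count_num_per_unique_name; infer_instance

-- ===== CLAIM (what is proved, stated in full; the proofs are below) =====
def Claim_equal_count_num_per_unique_name : Prop := ∀ (slices : List (List (String × String))), Dom_count_num_per_unique_name slices → Pre_count_num_per_unique_name slices → Spec_count_num_per_unique_name slices (count_num_per_unique_name slices)

-- ===== LEMMAS AND PROOFS =====

-- set(filter p xs) = filter p (set(xs)) : first-insertion dedup commutes with a filter
lemma set_foldl_add_filter (p : String → Bool) (ns : List String) :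
    ∀ s : List String,
      (ns.filter p).foldl PySem.Set.add (s.filter p) = (ns.foldl PySem.Set.add s).filter p := by
  induction ns with
  | nil => intro s; simp
  | cons x t ih =>
    intro s
    by_cases hp : p x = true
    · have hadd : PySem.Set.add (s.filter p) x = (PySem.Set.add s x).filter p := by
        by_cases hm : x ∈ s
        · simp [PySem.Set.add, List.contains_iff_mem, hm, hp]
        · simp [PySem.Set.add, List.contains_iff_mem, hm, hp, List.filter_append]
      simp only [List.filter_cons, hp, if_pos, List.foldl_cons, hadd, ih]
    · have hadd : (PySem.Set.add s x).filter p = s.filter p := by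
        by_cases hm : x ∈ s
        · simp [PySem.Set.add, hm]
        · simp [PySem.Set.add, hm, List.filter_append, hp]
      have hskip : (x :: t).filter p = t.filter p := by simp [hp]
      rw [hskip, List.foldl_cons, ← ih, hadd]

lemma set_ofList_filter (p : String → Bool) (ns : List String) :
    PySem.Set.ofList (ns.filter p) = (PySem.Set.ofList ns).filter p := by
  have h := set_foldl_add_filter p ns []
  simpa [PySem.Set.ofList_eq_foldl] using h

-- Counter(filter p ns) is Counter(ns) with the keys failing p filtered out of its items
lemma counter_filter (p : String → Bool) (ns : List String) :
    (PySem.Dict.counter (ns.filter p)).items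
      = ((PySem.Dict.counter ns).items).filter (fun q => p q.1) := by
  rw [PySem.Dict.items_counter, PySem.Dict.items_counter, List.filter_map]
  have hcomp : ((fun q : String × Int => p q.1) ∘ fun k => (k, (ns.count k : Int)))
      = fun k => p k := rfl
  rw [hcomp, set_ofList_filter]
  apply List.map_congr_left
  intro k hk
  rw [List.mem_filter] at hk
  rw [List.count_filter hk.2]

-- a foldl of erase over a key list filters the items by key
lemma items_foldl_erase (ig : List String) (d : PySem.Dict String Int) :
    (ig.foldl (fun c n => c.erase n) d).items
      = d.items.filter (fun q => !(ig.contains q.1)) := by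
  induction ig generalizing d with
  | nil => simp
  | cons k t ih =>
    rw [List.foldl_cons, ih, PySem.Dict.erase, List.filter_filter]
    apply List.filter_congr
    intro q _
    by_cases h : q.1 = k <;> simp [h]

-- A's if/else counting step is the unconditional insert-of-getD+1 step
lemma stepA_eq (c : PySem.Dict String Int) (n : String) :
    (if c.contains n = false then c.insert n 1 else c.modify n 0 (· + 1))
      = c.insert n (c.getD n 0 + 1) := by
  by_cases h : c.contains n = false
  · rw [if_pos h, PySem.Dict.getD_of_not_contains c 0 h]; norm_num
  · rw [if_neg h]; rfl

-- each counting loop, over a list of slices, is Counter of the mapped names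
lemma foldl_count_names (xs : List (List (String × String))) :
    xs.foldl (fun c s => c.insert (pvSliceName s) (c.getD (pvSliceName s) 0 + 1))
        PySem.Dict.empty
      = PySem.Dict.counter (xs.map pvSliceName) := by
  rw [← PySem.Dict.foldl_insert_getD_add_one_eq_counter, List.foldl_map]

theorem count_num_per_unique_name_spec : Claim_equal_count_num_per_unique_name := by
  intro slices _ _
  unfold Spec_count_num_per_unique_name count_num_per_unique_name count_num_per_unique_name_alt
    remove_ignore_insignficant_slices
  simp only []
  -- A side: turn the if/else step into the insert step, then into Counter of the filtered names
  rw [PySem.List.foldl_congr_mem' _ _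
      (fun c s => c.insert (pvSliceName s) (c.getD (pvSliceName s) 0 + 1)) _
      (fun s _ c => stepA_eq c (pvSliceName s)),
    foldl_count_names, foldl_count_names, items_foldl_erase]
  have hfm : (slices.filter is_interesting_slice).map pvSliceName
      = (slices.map pvSliceName).filter (fun n => !(pvIgnoreList.contains n)) := by
    rw [List.filter_map]
    rfl
  rw [hfm, counter_filter]

-- ===== VERDICT (by name: the statement is the Claim_ definition above) =====
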